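-- pv_equiv track=rewrite | github.com/Cbkhare/Challenges | Codility_split_array_.py | solution
-- ===== SOURCE A (Python) =====
-- def solution(X,A):
--     for i in range(len(A)):
--         if A[i]==X:
--             A[i]=1
--         else: A[i]=0
--     for i in range(1,len(A)):
--         if A[:i].count(1)==A[i:].count(0):
--             return i
--     else:   return 0
-- ===== SOURCE B (Python) =====
-- def solution(X, A):
--     # One pass with running prefix counts (does not mutate A; A mutates its
--     # argument in place, equivalence is about the return value only).
--     total_zeros = sum(1 for a in A if a != X)
--     ones = 0
--     zeros = 0
--     for i in range(1, len(A)):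
--         if A[i - 1] == X:
--             ones += 1
--         else:
--             zeros += 1
--         if ones == total_zeros - zeros:
--             return i
--     return 0
-- ===== Notes on version B (the rewrite author's own statement) =====
-- stated objective: faster
-- what changed: replaces the per-split slice-and-count scans with a single pass maintaining running prefix counts of matches and non-matches against a precomputed total
import Mathlib
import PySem

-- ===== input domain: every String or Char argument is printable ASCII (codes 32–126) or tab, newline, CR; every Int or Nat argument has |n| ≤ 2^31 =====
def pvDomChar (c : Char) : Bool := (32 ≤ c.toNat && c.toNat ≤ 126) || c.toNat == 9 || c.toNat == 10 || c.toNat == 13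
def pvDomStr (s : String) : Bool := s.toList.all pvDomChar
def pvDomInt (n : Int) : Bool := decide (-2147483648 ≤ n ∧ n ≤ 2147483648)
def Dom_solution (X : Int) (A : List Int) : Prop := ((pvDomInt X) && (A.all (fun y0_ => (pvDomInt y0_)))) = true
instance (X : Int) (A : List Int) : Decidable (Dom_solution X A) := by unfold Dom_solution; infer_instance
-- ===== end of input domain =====

-- B replaces A's per-split slice-and-count with one pass of running prefix counts;
-- A mutates its list argument in place, B does not: the equivalence proved is about the return value.

-- ===== PORT A =====
-- first loop: 'for i in range(len(A)): A[i] = 1 if A[i]==X else 0' (in-place rewrite, indices 0..len-1 all in range)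
def aTransform (X : Int) (A : List Int) : List Int :=
  (List.range A.length).foldl (fun acc i => acc.set i (if acc.getD i 0 = X then 1 else 0)) A

-- second loop: 'for i in range(1, len(A)): if A[:i].count(1)==A[i:].count(0): return i' / 'return 0'
def aFind (B : List Int) (i : Nat) : Int :=
  if i < B.length then
    if (PySem.List.slice B none (some (i : Int))).count 1
        = (PySem.List.slice B (some (i : Int)) none).count 0 then (i : Int)
    else aFind B (i + 1)
  else 0
termination_by B.length - i

def solution (X : Int) (A : List Int) : Int :=
  aFind (aTransform X A) 1

-- ===== PORT B =====
-- the single pass of Source B: element A[i-1] is consumed at step i = 1, 2, …, len-1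
def bLoop (X zt : Int) : List Int → Int → Int → Int → Int
  | [], _, _, _ => 0
  | [_], _, _, _ => 0
  | a :: rest, i, ones, zeros =>
      let ones' := if a = X then ones + 1 else ones
      let zeros' := if a = X then zeros else zeros + 1
      if ones' = zt - zeros' then i else bLoop X zt rest (i + 1) ones' zeros'

def solution_alt (X : Int) (A : List Int) : Int :=
  bLoop X (A.countP (fun a => a != X) : Int) A 1 0 0

-- ===== PRECONDITION & SPEC =====
def Spec_solution (X : Int) (A : List Int) (out : Int) : Prop := out = solution_alt X A
instance (X : Int) (A : List Int) (out : Int) : Decidable (Spec_solution X A out) := by unfold Spec_solution; infer_instance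

-- ===== CLAIM (what is proved, stated in full; the proofs are below) =====
def Claim_equal_solution : Prop := ∀ (X : Int) (A : List Int), Dom_solution X A → Spec_solution X A (solution X A)

-- ===== LEMMAS AND PROOFS =====

-- the 0/1 value A's first loop writes at each position
def pvF (X a : Int) : Int := if a = X then 1 else 0

lemma aTransform_prefix (X : Int) (A : List Int) :
    ∀ k, k ≤ A.length →
      (List.range k).foldl (fun acc i => acc.set i (if acc.getD i 0 = X then 1 else 0)) A
        = (A.take k).map (pvF X) ++ A.drop k := by
  intro k
  induction k with
  | zero => simp
  | succ k ih =>
      intro hk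
      have hk' : k < A.length := by omega
      rw [List.range_succ, List.foldl_append, ih (by omega)]
      simp only [List.foldl_cons, List.foldl_nil]
      have hlen : ((A.take k).map (pvF X)).length = k := by
        simp [List.length_take, Nat.min_eq_left (le_of_lt hk')]
      have hdrop : A.drop k = A[k] :: A.drop (k + 1) := (List.getElem_cons_drop hk').symm
      rw [hdrop]
      have hget : ((A.take k).map (pvF X) ++ A[k] :: A.drop (k + 1)).getD k 0 = A[k] := by
        rw [List.getD_append_right _ _ _ _ (le_of_eq hlen)]
        rw [hlen, Nat.sub_self]
        rfl
      rw [hget]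
      have hset : ((A.take k).map (pvF X) ++ A[k] :: A.drop (k + 1)).set k
          (if A[k] = X then 1 else 0)
          = (A.take k).map (pvF X) ++ (if A[k] = X then 1 else 0) :: A.drop (k + 1) := by
        rw [List.set_append_right _ _ (le_of_eq hlen)]
        rw [hlen, Nat.sub_self]
        rfl
      rw [hset]
      have htake : A.take (k + 1) = A.take k ++ [A[k]] := by
        rw [List.take_add_one, List.getElem?_eq_getElem hk']; rfl
      rw [htake, List.map_append]
      simp [pvF]

lemma aTransform_eq_map (X : Int) (A : List Int) :
    aTransform X A = A.map (pvF X) := by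
  have := aTransform_prefix X A A.length le_rfl
  simpa [aTransform] using this

-- the two split conditions agree: count of 1s in the mapped prefix = prefix count of X,
-- count of 0s in the mapped suffix = total non-X count minus prefix non-X count
lemma cond_eq (X : Int) (A : List Int) (j : Nat) :
    ((((A.map (pvF X)).take j).count 1 = ((A.map (pvF X)).drop j).count 0)) ↔
      (((A.take j).count X : Int)
        = (A.countP (fun a => a != X) : Int) - ((A.take j).countP (fun a => a != X) : Int)) := by
  have h1 : ((A.map (pvF X)).take j).count 1 = (A.take j).count X := by
    rw [← List.map_take, List.count_eq_countP, List.countP_map, List.count_eq_countP]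
    apply List.countP_congr
    intro a _
    by_cases h : a = X <;> simp [pvF, h, Function.comp]
  have h0 : ((A.map (pvF X)).drop j).count 0 = (A.drop j).countP (fun a => a != X) := by
    rw [← List.map_drop, List.count_eq_countP, List.countP_map]
    apply List.countP_congr
    intro a _
    by_cases h : a = X <;> simp [pvF, h, Function.comp]
  have hsplit : A.countP (fun a => a != X)
      = (A.take j).countP (fun a => a != X) + (A.drop j).countP (fun a => a != X) := by
    conv_lhs => rw [← List.take_append_drop j A]
    rw [List.countP_append]
  rw [h1, h0]
  omega

lemma loop_eq (X : Int) (A : List Int) :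
    ∀ (rest : List Int) (k : Nat), k ≤ A.length → A.drop k = rest →
      aFind (A.map (pvF X)) (k + 1)
        = bLoop X (A.countP (fun a => a != X) : Int) rest ((k : Int) + 1)
            ((A.take k).count X : Int) ((A.take k).countP (fun a => a != X) : Int) := by
  intro rest
  induction rest with
  | nil =>
      intro k hk hd
      have : A.length ≤ k := List.drop_eq_nil_iff.mp hd
      have hno : ¬ (k + 1 < (A.map (pvF X)).length) := by
        simp only [List.length_map]; omega
      rw [aFind, if_neg hno]
      rfl
  | cons a tl ih =>
      intro k hk hd
      have hlen : tl.length + 1 = A.length - k := by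
        have := congrArg List.length hd
        simpa using this.symm
      have hk' : k < A.length := by omega
      have hdrop : A.drop k = A[k] :: A.drop (k + 1) := (List.getElem_cons_drop hk').symm
      have h2 := hdrop.symm.trans hd
      have ha : A[k] = a := (List.cons.inj h2).1
      have htl : A.drop (k + 1) = tl := (List.cons.inj h2).2
      have htake : A.take (k + 1) = A.take k ++ [a] := by
        rw [List.take_add_one, List.getElem?_eq_getElem hk', ha]; rfl
      have hcount1 : ((A.take (k + 1)).count X : Int)
          = if a = X then ((A.take k).count X : Int) + 1 else ((A.take k).count X : Int) := by
        rw [htake, List.count_append]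
        by_cases h : a = X <;> simp [h]
      have hcount0 : ((A.take (k + 1)).countP (fun x => x != X) : Int)
          = if a = X then ((A.take k).countP (fun x => x != X) : Int)
            else ((A.take k).countP (fun x => x != X) : Int) + 1 := by
        rw [htake, List.countP_append]
        by_cases h : a = X <;> simp [h]
      cases tl with
      | nil =>
          simp only [List.length_nil] at hlen
          have hno : ¬ (k + 1 < (A.map (pvF X)).length) := by
            simp only [List.length_map]; omega
          rw [aFind, if_neg hno]
          rfl
      | cons b rest' =>
          simp only [List.length_cons] at hlen
          have hklt : k + 1 < A.length := by omega
          have hyes : k + 1 < (A.map (pvF X)).length := by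
            simp only [List.length_map]; omega
          rw [aFind, if_pos hyes]
          rw [PySem.List.slice_to_natCast, PySem.List.slice_from_natCast]
          show (if ((A.map (pvF X)).take (k+1)).count 1 = ((A.map (pvF X)).drop (k+1)).count 0
                then ((k + 1 : Nat) : Int) else aFind (A.map (pvF X)) (k + 1 + 1)) = _
          simp only [bLoop]
          have hcond : (((A.map (pvF X)).take (k+1)).count 1 = ((A.map (pvF X)).drop (k+1)).count 0)
              ↔ ((if a = X then ((A.take k).count X : Int) + 1 else ((A.take k).count X : Int))
                  = (A.countP (fun x => x != X) : Int)
                    - (if a = X then ((A.take k).countP (fun x => x != X) : Int)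
                       else ((A.take k).countP (fun x => x != X) : Int) + 1)) := by
            rw [cond_eq X A (k + 1), hcount1, hcount0]
          by_cases hc : ((A.map (pvF X)).take (k+1)).count 1 = ((A.map (pvF X)).drop (k+1)).count 0
          · rw [if_pos hc, if_pos (hcond.mp hc)]
            push_cast; ring
          · rw [if_neg hc, if_neg (fun h => hc (hcond.mpr h))]
            have hrec := ih (k + 1) (by omega) htl
            rw [hcount1, hcount0] at hrec
            have hidx : ((k + 1 : Nat) : Int) + 1 = (k : Int) + 1 + 1 := by push_cast; ring
            rw [hidx] at hrec
            exact hrec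

-- ===== VERDICT (by name: the statement is the Claim_ definition above) =====
theorem solution_spec : Claim_equal_solution := by
  intro X A _
  unfold Spec_solution solution solution_alt
  rw [aTransform_eq_map]
  have := loop_eq X A A 0 (by omega) (by simp)
  simpa using this
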